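-- pv_equiv track=rewrite | github.com/rohan-dot/Rasa-NLU | vuln_discovery.py | _extract_risky_functions
-- ===== SOURCE A (Python) =====
-- def _extract_risky_functions(content: str, filename: str) -> str:
--     """Extract functions that contain risky patterns from a large file."""
--     lines = content.splitlines()
--     risky_keywords = [
--         "memcpy", "strcpy", "sprintf", "malloc", "realloc", "free",
--         "length", "size", "chunk", "buffer", "offset", "read",
--         "parse", "decode", "packet", "header",
--     ]
--
--     # Find lines with risky keywords
--     risky_lines: set[int] = set()
--     for i, line in enumerate(lines):
--         line_lower = line.lower()
--         for kw in risky_keywords: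
--             if kw in line_lower:
--                 risky_lines.add(i)
--                 break
--
--     if not risky_lines:
--         return content[:3000]
--
--     # Extract context around risky lines
--     parts: list[str] = []
--     total = 0
--     for line_num in sorted(risky_lines):
--         start = max(0, line_num - 15)
--         end = min(len(lines), line_num + 15)
--         section = "\n".join(f"{i+1}: {lines[i]}" for i in range(start, end))
--         if total + len(section) > 6000:
--             break
--         parts.append(section)
--         total += len(section)
--
--     return "\n...\n".join(parts)
-- ===== SOURCE B (Python) =====
-- def _extract_risky_functions(content: str, filename: str) -> str:
--     """Single fused pass over enumerate(lines): no intermediate set, no sort."""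
--     lines = content.splitlines()
--     risky_keywords = [
--         "memcpy", "strcpy", "sprintf", "malloc", "realloc", "free",
--         "length", "size", "chunk", "buffer", "offset", "read",
--         "parse", "decode", "packet", "header",
--     ]
--     n = len(lines)
--     parts = []
--     total = 0
--     found_any = False
--     for i, line in enumerate(lines):
--         low = line.lower()
--         if any(kw in low for kw in risky_keywords):
--             found_any = True
--             start = max(0, i - 15)
--             end = min(n, i + 15)
--             section = "\n".join(f"{j+1}: {lines[j]}" for j in range(start, end))
--             if total + len(section) > 6000:
--                 break
--             parts.append(section)
--             total += len(section)
--     if not found_any: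
--         return content[:3000]
--     return "\n...\n".join(parts)
-- ===== Notes on version B (the rewrite author's own statement) =====
-- stated objective: alternative
-- what changed: Fused A's two phases (build a set of risky line indices, then sort it and extract contexts) into one pass over enumerate(lines) with a found_any flag, eliminating the intermediate set and the sort.
import Mathlib
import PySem

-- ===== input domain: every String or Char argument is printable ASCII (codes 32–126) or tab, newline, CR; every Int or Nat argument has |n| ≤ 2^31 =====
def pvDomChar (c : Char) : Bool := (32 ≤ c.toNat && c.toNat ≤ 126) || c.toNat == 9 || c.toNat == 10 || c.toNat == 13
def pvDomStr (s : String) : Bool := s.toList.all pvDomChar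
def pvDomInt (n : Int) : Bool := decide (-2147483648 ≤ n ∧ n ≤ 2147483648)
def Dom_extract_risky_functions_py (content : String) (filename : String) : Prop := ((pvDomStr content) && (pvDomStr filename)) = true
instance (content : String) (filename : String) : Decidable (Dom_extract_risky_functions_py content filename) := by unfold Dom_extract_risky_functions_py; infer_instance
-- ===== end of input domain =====

-- B fuses A's two phases (collect a set of risky line indices, then sort and extract
-- contexts) into one pass over the enumerated lines with a found_any flag; objective:
-- alternative (removes the intermediate set and the sort).

-- the keyword list (shared data constant)
def pvKeywords : List String :=
  ["memcpy", "strcpy", "sprintf", "malloc", "realloc", "free",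
   "length", "size", "chunk", "buffer", "offset", "read",
   "parse", "decode", "packet", "header"]

-- ===== PORT A =====
-- A's inner 'for kw in risky_keywords: if kw in line_lower: … break' loop
def pvKwScanA : List String → String → Bool
  | [], _ => false
  | kw :: rest, low => if PySem.Str.isIn kw low then true else pvKwScanA rest low

-- A's first loop: build the set of risky line numbers
def pvRiskyLoopA : List (Int × String) → PySem.Set Int → PySem.Set Int
  | [], s => s
  | (i, line) :: rest, s =>
    if pvKwScanA pvKeywords (PySem.Str.lower line) then pvRiskyLoopA rest (PySem.Set.add s i)
    else pvRiskyLoopA rest s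

-- section = "\n".join(f"{i+1}: {lines[i]}" for i in range(start, end))
def pvSectionA (lines : List String) (lineNum : Int) : String :=
  let start := max 0 (lineNum - 15)
  let stop := min (lines.length : Int) (lineNum + 15)
  PySem.Str.join "\n"
    ((PySem.List.pyRange start stop 1).map
      (fun i => PySem.Int.toStr (i + 1) ++ ": " ++ PySem.List.pyGetD lines i ""))

-- A's second loop over sorted(risky_lines), with the budget break
def pvExtractA (lines : List String) : List Int → List String → Int → List String
  | [], parts, _ => parts
  | lineNum :: rest, parts, total =>
    let sec := pvSectionA lines lineNum
    if total + PySem.Str.len sec > 6000 then parts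
    else pvExtractA lines rest (parts ++ [sec]) (total + PySem.Str.len sec)

def extract_risky_functions_py (content : String) (filename : String) : String :=
  let lines := PySem.Str.splitlines content
  let risky := pvRiskyLoopA (PySem.List.enumerate lines 0) PySem.Set.empty
  if risky.isEmpty then PySem.Str.slice content none (some 3000)
  else PySem.Str.join "\n...\n" (pvExtractA lines (PySem.List.sorted risky id) [] 0)

-- ===== PORT B =====
def pvSectionB (lines : List String) (lineNum : Int) : String :=
  let start := max 0 (lineNum - 15)
  let stop := min (lines.length : Int) (lineNum + 15)
  PySem.Str.join "\n"
    ((PySem.List.pyRange start stop 1).map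
      (fun j => PySem.Int.toStr (j + 1) ++ ": " ++ PySem.List.pyGetD lines j ""))

-- B's single fused loop: (parts, total, found_any); break returns early
def pvLoopB (lines : List String) : List (Int × String) → List String → Int → Bool → List String × Bool
  | [], parts, _, found => (parts, found)
  | (i, line) :: rest, parts, total, found =>
    let low := PySem.Str.lower line
    if pvKeywords.any (fun kw => PySem.Str.isIn kw low) then
      let sec := pvSectionB lines i
      if total + PySem.Str.len sec > 6000 then (parts, true)
      else pvLoopB lines rest (parts ++ [sec]) (total + PySem.Str.len sec) true
    else pvLoopB lines rest parts total found

def extract_risky_functions_py_alt (content : String) (filename : String) : String :=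
  let lines := PySem.Str.splitlines content
  let r := pvLoopB lines (PySem.List.enumerate lines 0) [] 0 false
  if r.2 then PySem.Str.join "\n...\n" r.1
  else PySem.Str.slice content none (some 3000)

-- ===== PRECONDITION & SPEC =====
def Spec_extract_risky_functions_py (content : String) (filename : String) (out : String) : Prop := out = extract_risky_functions_py_alt content filename
instance (content : String) (filename : String) (out : String) : Decidable (Spec_extract_risky_functions_py content filename out) := by unfold Spec_extract_risky_functions_py; infer_instance

-- ===== CLAIM (what is proved, stated in full; the proofs are below) =====
def Claim_equal_extract_risky_functions_py : Prop := ∀ (content : String) (filename : String), Dom_extract_risky_functions_py content filename → Spec_extract_risky_functions_py content filename (extract_risky_functions_py content filename)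

-- ===== LEMMAS AND PROOFS =====

-- the per-line match predicate both loops decide
def pvHit (line : String) : Bool :=
  pvKeywords.any (fun kw => PySem.Str.isIn kw (PySem.Str.lower line))

theorem pvKwScanA_eq_any (ks : List String) (low : String) :
    pvKwScanA ks low = ks.any (fun kw => PySem.Str.isIn kw low) := by
  induction ks with
  | nil => rfl
  | cons kw rest ih => by_cases h : PySem.Str.isIn kw low <;> simp [pvKwScanA, h, ih]

theorem pvSections_eq (lines : List String) (i : Int) :
    pvSectionB lines i = pvSectionA lines i := rfl

-- A's first loop builds exactly the (already increasing) list of matching indices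
theorem pvRiskyLoopA_eq (l : List (Int × String)) (s : PySem.Set Int)
    (hs : ∀ p ∈ l, p.1 ∉ s) (hpw : l.Pairwise (fun p q => p.1 < q.1)) :
    pvRiskyLoopA l s = s ++ (l.filter (fun p => pvHit p.2)).map (·.1) := by
  induction l generalizing s with
  | nil => simp [pvRiskyLoopA]
  | cons p rest ih =>
    obtain ⟨i, line⟩ := p
    have hpw' := (List.pairwise_cons.mp hpw).2
    have hhead := (List.pairwise_cons.mp hpw).1
    by_cases h : pvHit line
    · have hnot : i ∉ s := hs (i, line) (by simp)
      have hadd : PySem.Set.add s i = s ++ [i] := by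
        simp [PySem.Set.add, hnot]
      have hrest : ∀ p ∈ rest, p.1 ∉ s ++ [i] := by
        intro q hq
        simp only [List.mem_append, List.mem_singleton]
        rintro (hmem | heq)
        · exact hs q (List.mem_cons_of_mem _ hq) hmem
        · exact absurd heq (by have := hhead q hq; omega)
      simp only [pvRiskyLoopA, pvKwScanA_eq_any]
      rw [if_pos (by simpa [pvHit] using h), hadd, ih _ hrest hpw']
      simp [h, List.append_assoc]
    · simp only [pvRiskyLoopA, pvKwScanA_eq_any]
      rw [if_neg (by simpa [pvHit] using h),
        ih _ (fun q hq => hs q (List.mem_cons_of_mem _ hq)) hpw']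
      simp [h]

-- the matching-index list is strictly increasing
theorem pvR_pairwise (l : List (Int × String)) (hpw : l.Pairwise (fun p q => p.1 < q.1)) :
    ((l.filter (fun p => pvHit p.2)).map (·.1)).Pairwise (· < ·) := by
  rw [List.pairwise_map]
  exact hpw.filter _

-- B's fused loop = A's extraction loop over the matching indices, plus the found_any flag
theorem pvLoopB_eq (lines : List String) (l : List (Int × String))
    (parts : List String) (total : Int) (found : Bool) :
    pvLoopB lines l parts total found =
      (pvExtractA lines ((l.filter (fun p => pvHit p.2)).map (·.1)) parts total,
       found || !((l.filter (fun p => pvHit p.2)).isEmpty)) := by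
  induction l generalizing parts total found with
  | nil => simp [pvLoopB, pvExtractA]
  | cons p rest ih =>
    obtain ⟨i, line⟩ := p
    by_cases h : pvHit line
    · have hf : List.filter (fun p => pvHit p.2) ((i, line) :: rest)
          = (i, line) :: List.filter (fun p => pvHit p.2) rest :=
        List.filter_cons_of_pos (by simpa using h)
      have hx : ∀ pp tt, pvExtractA lines
            (i :: (rest.filter (fun p => pvHit p.2)).map (·.1)) pp tt
          = if tt + PySem.Str.len (pvSectionA lines i) > 6000 then pp
            else pvExtractA lines ((rest.filter (fun p => pvHit p.2)).map (·.1))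
              (pp ++ [pvSectionA lines i]) (tt + PySem.Str.len (pvSectionA lines i)) :=
        fun pp tt => rfl
      simp only [pvLoopB, hf, List.map_cons, List.isEmpty_cons, hx, pvSections_eq]
      rw [if_pos (by simpa [pvHit] using h)]
      by_cases hb : total + PySem.Str.len (pvSectionA lines i) > 6000
      · rw [if_pos hb, if_pos hb]
        simp
      · rw [if_neg hb, if_neg hb, ih]
        simp
    · have hf : List.filter (fun p => pvHit p.2) ((i, line) :: rest)
          = List.filter (fun p => pvHit p.2) rest :=
        List.filter_cons_of_neg (by simpa using h)
      simp only [pvLoopB, hf]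
      rw [if_neg (by simpa [pvHit] using h), ih]

-- ===== VERDICT (by name: the statement is the Claim_ definition above) =====
theorem extract_risky_functions_py_spec : Claim_equal_extract_risky_functions_py := by
  intro content filename _
  unfold Spec_extract_risky_functions_py extract_risky_functions_py extract_risky_functions_py_alt
  simp only []
  have hpw := PySem.List.pairwise_lt_enumerate (PySem.Str.splitlines content) 0
  have hrisky := pvRiskyLoopA_eq (PySem.List.enumerate (PySem.Str.splitlines content) 0)
    PySem.Set.empty (by simp [PySem.Set.empty]) hpw
  replace hrisky : pvRiskyLoopA (PySem.List.enumerate (PySem.Str.splitlines content))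
      PySem.Set.empty = List.map (fun x => x.1) (List.filter (fun p => pvHit p.2)
      (PySem.List.enumerate (PySem.Str.splitlines content))) := by rw [hrisky]; rfl
  have hB := pvLoopB_eq (PySem.Str.splitlines content)
    (PySem.List.enumerate (PySem.Str.splitlines content) 0) [] 0 false
  rw [hrisky, hB]
  by_cases hfE : (List.filter (fun p => pvHit p.2)
      (PySem.List.enumerate (PySem.Str.splitlines content) 0)).isEmpty
  · rw [List.isEmpty_iff] at hfE
    rw [hfE]
    simp
  · have hmapE : ¬ (((PySem.List.enumerate (PySem.Str.splitlines content) 0).filter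
        (fun p => pvHit p.2)).map (·.1)).isEmpty := by
      simpa [List.isEmpty_iff, List.map_eq_nil_iff, List.isEmpty_iff] using hfE
    rw [if_neg (by simpa using hmapE)]
    have hsorted := PySem.List.sorted_eq_of_perm_of_pairwise_lt
      (((PySem.List.enumerate (PySem.Str.splitlines content) 0).filter
        (fun p => pvHit p.2)).map (·.1))
      (((PySem.List.enumerate (PySem.Str.splitlines content) 0).filter
        (fun p => pvHit p.2)).map (·.1)) id (List.Perm.refl _)
      (by simpa using pvR_pairwise _ hpw)
    rw [hsorted]
    have : (false || !(List.filter (fun p => pvHit p.2)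
        (PySem.List.enumerate (PySem.Str.splitlines content) 0)).isEmpty) = true := by
      simp [Bool.not_eq_true'] at hfE ⊢
      simp [hfE]
    rw [this]
    rfl
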